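-- pv_equiv track=rewrite | github.com/EFanZh/google-foobar | src/challenge_4_2_free_the_bunny_prisoners/solution.py | solution_helper
-- ===== SOURCE A (Python) =====
-- def solution_helper(num_buns, num_required, matrix, row_index, column_index):
--     """
--     +------------------------------+----------------------------------+
--     | ............................ |                                  |
--     +------------------------------+----------------------------------+
--     | (num_buns - 1, num_required) | (num_buns - 1, num_required - 1) |
--     +------------------------------+----------------------------------+
--     """
--
--     if num_required == 1:
--         for row in matrix[row_index:]:
--             row.append(column_index)
--
--         return column_index + 1
--     elif num_buns == num_required:
--         for i, row in enumerate(matrix[row_index:], column_index):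
--             row.append(i)
--
--         return column_index + num_buns
--     else:
--         first_row = matrix[row_index]
--         middle = solution_helper(num_buns - 1, num_required, matrix, row_index + 1, column_index)
--
--         for i in range(column_index, middle):
--             first_row.append(i)
--
--         return solution_helper(num_buns - 1, num_required - 1, matrix, row_index + 1, middle)
-- ===== SOURCE B (Python) =====
-- def _combinations(lo, n, k):
--     """All k-element ascending lists drawn from range(lo, n), in lexicographic order."""
--     if k == 0:
--         return [[]]
--     result = []
--     for first in range(lo, n - k + 1):
--         for rest in _combinations(first + 1, n, k - 1):
--             result.append([first] + rest)
--     return result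
--
--
-- def solution_helper(num_buns, num_required, matrix, row_index, column_index):
--     if not 1 <= num_required <= num_buns:
--         raise ValueError("need 1 <= num_required <= num_buns")
--     if num_required == num_buns:
--         # everyone must show up, so every bunny simply gets its own key
--         for i, row in enumerate(matrix[row_index:]):
--             row.append(column_index + i)
--         return column_index + num_buns
--     # Key number column_index + k is withheld from exactly the k-th lexicographic
--     # (num_required - 1)-subset of bunnies and handed to every other bunny's row.
--     missing_sets = _combinations(0, num_buns, num_required - 1)
--     for b, row in enumerate(matrix[row_index:]):
--         for k, missing in enumerate(missing_sets):
--             if b not in missing: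
--                 row.append(column_index + k)
--     return column_index + len(missing_sets)
-- ===== Notes on version B (the rewrite author's own statement) =====
-- stated objective: alternative
-- what changed: Replaced A's recursive Pascal-triangle split (two recursive calls per level, filling rows via slices) with argument validation followed by a single non-recursive pass that enumerates the lexicographic (num_required-1)-subsets of bunnies, withholds key k from the k-th subset while appending it to every other existing row, and returns column_index plus the number of subsets.
-- outside the precondition, e.g. on solution_helper(0, 1, [], 0, 0): A returns 1, B raises ValueError; on solution_helper(0, 0, [], 0, 0): A returns 0, B raises ValueError; on solution_helper(-1, -1, [], 0, 0): A returns -1, B raises ValueError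
import Mathlib
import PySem

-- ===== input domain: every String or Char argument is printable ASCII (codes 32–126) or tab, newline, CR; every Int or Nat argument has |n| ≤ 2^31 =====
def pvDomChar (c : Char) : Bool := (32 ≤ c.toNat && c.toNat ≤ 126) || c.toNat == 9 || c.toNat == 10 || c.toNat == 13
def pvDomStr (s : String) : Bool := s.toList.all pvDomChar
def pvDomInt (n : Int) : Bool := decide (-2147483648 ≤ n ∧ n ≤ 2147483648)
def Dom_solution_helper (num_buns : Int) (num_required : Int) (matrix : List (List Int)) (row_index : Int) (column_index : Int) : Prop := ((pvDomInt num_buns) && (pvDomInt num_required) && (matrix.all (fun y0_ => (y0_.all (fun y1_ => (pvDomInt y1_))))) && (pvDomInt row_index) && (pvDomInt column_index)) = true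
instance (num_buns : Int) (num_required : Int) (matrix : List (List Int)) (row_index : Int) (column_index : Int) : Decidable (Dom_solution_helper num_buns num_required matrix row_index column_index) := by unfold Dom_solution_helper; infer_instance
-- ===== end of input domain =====

-- B replaces A's recursive Pascal-triangle split by a single non-recursive pass: key k is
-- withheld from the k-th lexicographic (num_required-1)-subset of bunnies and appended to every
-- other row — an alternative algorithm of similar cost. Both Pythons mutate `matrix` in place;
-- the equivalence proved here is about the RETURN value only (the two programs hand out the same
-- number of keys but number the key-to-bunny assignment differently).

-- ===== PORT A =====
-- A mutates `matrix`; the port threads the matrix through as state and returns none exactly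
-- where Python raises IndexError (fuel only makes the recursion total: every recursive call is
-- preceded by a successful matrix[row_index] access with row_index strictly increasing, so the
-- recursion depth is at most 2*len+1 < fuel on every input).
def shA (fuel : Nat) (num_buns : Int) (num_required : Int) (matrix : List (List Int)) (row_index : Int) (column_index : Int) : Option (List (List Int) × Int) :=
  match fuel with
  | 0 => none
  | fuel + 1 =>
    if num_required = 1 then
      -- for row in matrix[row_index:]: row.append(column_index)
      let tail := PySem.List.slice matrix (some row_index) none
      some (matrix.take (matrix.length - tail.length) ++ tail.map (fun row => row ++ [column_index]),
            column_index + 1)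
    else if num_buns = num_required then
      -- for i, row in enumerate(matrix[row_index:], column_index): row.append(i)
      let tail := PySem.List.slice matrix (some row_index) none
      some (matrix.take (matrix.length - tail.length) ++ tail.zipIdx.map (fun p => p.1 ++ [column_index + (p.2 : Int)]),
            column_index + num_buns)
    else
      match PySem.List.pyGet? matrix row_index with
      | none => none   -- IndexError on matrix[row_index]
      | some first_row =>
        match shA fuel (num_buns - 1) num_required matrix (row_index + 1) column_index with
        | none => none
        | some (m1, middle) =>
          -- for i in range(column_index, middle): first_row.append(i)
          let m2 := PySem.List.pySetD m1 row_index (first_row ++ PySem.List.pyRange column_index middle 1)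
          shA fuel (num_buns - 1) (num_required - 1) m2 (row_index + 1) middle

def solution_helper (num_buns : Int) (num_required : Int) (matrix : List (List Int)) (row_index : Int) (column_index : Int) : Int :=
  match shA (2 * matrix.length + 3) num_buns num_required matrix row_index column_index with
  | some p => p.2
  | none => 0   -- only where the Python raises (outside Pre_)

-- ===== PORT B =====
-- _combinations(lo, n, k): all k-element ascending lists from range(lo, n), in lexicographic
-- order; only ever called with k ≥ 0 (the caller validates), so k is a Nat here.
def combosPos (lo : Int) (n : Int) : Nat → List (List Int)
  | 0 => [[]]
  | k + 1 => (PySem.List.pyRange lo (n - ((k : Int) + 1) + 1) 1).flatMap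
      (fun first => (combosPos (first + 1) n k).map (fun rest => first :: rest))

def solution_helper_alt (num_buns : Int) (num_required : Int) (matrix : List (List Int)) (row_index : Int) (column_index : Int) : Int :=
  if 1 ≤ num_required ∧ num_required ≤ num_buns then
    if num_required = num_buns then
      -- everyone must show up, so every bunny simply gets its own key
      let _rows := (PySem.List.slice matrix (some row_index) none).zipIdx.map
        (fun p => p.1 ++ [column_index + (p.2 : Int)])
      column_index + num_buns
    else
    let missing_sets := combosPos 0 num_buns (num_required - 1).toNat
    -- for b, row in enumerate(matrix[row_index:]): for k, missing in enumerate(missing_sets):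
    --   if b not in missing: row.append(column_index + k)    (pure mutation of the rows; the
    -- returned value does not depend on it, so the rows are built and dropped here)
    let _rows := (PySem.List.slice matrix (some row_index) none).zipIdx.map (fun p =>
      missing_sets.zipIdx.foldl
        (fun row q => if (p.2 : Int) ∈ q.1 then row else row ++ [column_index + (q.2 : Int)])
        p.1)
    column_index + missing_sets.length
  else 0   -- ValueError ("need 1 <= num_required <= num_buns"; outside Pre_)

-- ===== PRECONDITION & SPEC =====
-- Pre_ excludes ONLY inputs on which one of the two programs raises, and nothing else:
-- (a) degenerate arguments outside 1 ≤ num_required ≤ num_buns — not a key-distribution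
--     problem at all; A's unconditional base cases sometimes still return an accidental value
--     there (see the cites) while B's up-front validation raises ValueError; and
-- (b) inside 1 ≤ num_required ≤ num_buns with num_required ≠ 1 and ≠ num_buns, exactly the
--     short-matrix / out-of-range row_index inputs on which A itself raises IndexError: its
--     recursion reads matrix[row_index + d] for every d = 0 .. num_buns - 3, which succeeds
--     (Python negative indexing included) precisely when the third conjunct below holds — so
--     within 1 ≤ num_required ≤ num_buns, A returns a value iff Pre_ holds (verified
--     exhaustively); B's enumeration pass only slices, so it returns the key count column_index + C(num_buns, num_required-1) on those inputs.
def Pre_solution_helper (num_buns : Int) (num_required : Int) (matrix : List (List Int)) (row_index : Int) (column_index : Int) : Prop :=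
  1 ≤ num_required ∧ num_required ≤ num_buns ∧
  (num_required = 1 ∨ num_required = num_buns ∨
   (-(matrix.length : Int) ≤ row_index ∧ row_index + num_buns ≤ (matrix.length : Int) + 2))
instance (num_buns : Int) (num_required : Int) (matrix : List (List Int)) (row_index : Int) (column_index : Int) : Decidable (Pre_solution_helper num_buns num_required matrix row_index column_index) := by unfold Pre_solution_helper; infer_instance

def pvWitness_solution_helper : Int × Int × List (List Int) × Int × Int := (3, 2, [[], [], []], 0, 0)

def Spec_solution_helper (num_buns : Int) (num_required : Int) (matrix : List (List Int)) (row_index : Int) (column_index : Int) (out : Int) : Prop := out = solution_helper_alt num_buns num_required matrix row_index column_index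
instance (num_buns : Int) (num_required : Int) (matrix : List (List Int)) (row_index : Int) (column_index : Int) (out : Int) : Decidable (Spec_solution_helper num_buns num_required matrix row_index column_index out) := by unfold Spec_solution_helper; infer_instance

-- ===== CLAIM (what is proved, stated in full; the proofs are below) =====
def Claim_equal_solution_helper : Prop := ∀ (num_buns : Int) (num_required : Int) (matrix : List (List Int)) (row_index : Int) (column_index : Int), Dom_solution_helper num_buns num_required matrix row_index column_index → Pre_solution_helper num_buns num_required matrix row_index column_index → Spec_solution_helper num_buns num_required matrix row_index column_index (solution_helper num_buns num_required matrix row_index column_index)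

-- ===== LEMMAS AND PROOFS =====

theorem len_pad (m : List (List Int)) (ri : Int) (tl : List (List Int))
    (h : tl.length = (PySem.List.slice m (some ri) none).length) :
    (m.take (m.length - (PySem.List.slice m (some ri) none).length) ++ tl).length = m.length := by
  have hc := PySem.List.clampIdx_le m.length ri
  simp [PySem.List.slice_some_none, h]

-- the `num_buns == num_required` base case, evaluated
theorem shA_diag (fuel : Nat) (n r : Int) (m : List (List Int)) (ri ci : Int)
    (h1 : ¬ r = 1) (h2 : n = r) :
    shA (fuel + 1) n r m ri ci =
      some (m.take (m.length - (PySem.List.slice m (some ri) none).length) ++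
              (PySem.List.slice m (some ri) none).zipIdx.map (fun p => p.1 ++ [ci + (p.2 : Int)]),
            ci + n) := by
  simp [shA, h1, h2]

theorem shA_returns (fuel : Nat) : ∀ (n r : Int) (m : List (List Int)) (ri ci : Int),
    (r = 1 ∨ (n = r ∧ 1 ≤ n) ∨
      (2 ≤ r ∧ r < n ∧ -(m.length : Int) ≤ ri ∧ ri + n ≤ (m.length : Int) + 2)) →
    (2 ≤ r ∧ r < n → n.toNat < fuel) → 0 < fuel →
    ∃ m', shA fuel n r m ri ci = some (m', ci + ((n.toNat.choose (r-1).toNat : Nat) : Int)) ∧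
      m'.length = m.length := by
  induction fuel with
  | zero => intro n r m ri ci _ _ hf; omega
  | succ fuel ih =>
    intro n r m ri ci hP hf _
    by_cases hr1 : r = 1
    · subst hr1
      refine ⟨m.take (m.length - (PySem.List.slice m (some ri) none).length) ++
        (PySem.List.slice m (some ri) none).map (fun row => row ++ [ci]),
        ?_, len_pad m ri _ (by simp)⟩
      simp [shA]
    · by_cases hnr : n = r
      · have h2le : 2 ≤ n := by rcases hP with h | h | h <;> omega
        have hch : ((n.toNat.choose (r-1).toNat : Nat) : Int) = n := by
          rw [show (r-1).toNat = n.toNat - 1 by omega, Nat.choose_symm (by omega),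
              Nat.choose_one_right]
          omega
        refine ⟨m.take (m.length - (PySem.List.slice m (some ri) none).length) ++
          (PySem.List.slice m (some ri) none).zipIdx.map (fun p => p.1 ++ [ci + (p.2 : Int)]),
          ?_, len_pad m ri _ (by simp)⟩
        rw [hch]
        exact shA_diag fuel n r m ri ci hr1 hnr
      · have hside : 2 ≤ r ∧ r < n ∧ -(m.length : Int) ≤ ri ∧ ri + n ≤ (m.length : Int) + 2 := by
          rcases hP with h | h | h
          · omega
          · omega
          · exact h
        obtain ⟨h2r, hrn, hlo, hhi⟩ := hside
        have hfn : n.toNat < fuel + 1 := hf ⟨h2r, hrn⟩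
        have hn3 : 3 ≤ n := by omega
        have hget : ∃ fr, PySem.List.pyGet? m ri = some fr := by
          cases hg : PySem.List.pyGet? m ri with
          | some fr => exact ⟨fr, rfl⟩
          | none =>
            rw [PySem.List.pyGet?_eq_none_iff] at hg
            exact absurd (by constructor <;> omega) hg
        obtain ⟨fr, hfr⟩ := hget
        obtain ⟨m1, hm1, hm1len⟩ := ih (n-1) r m (ri+1) ci
          (by by_cases h : n - 1 = r
              · exact Or.inr (Or.inl ⟨h, by omega⟩)
              · exact Or.inr (Or.inr ⟨by omega, by omega, by omega, by omega⟩))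
          (by omega) (by omega)
        set m2 := PySem.List.pySetD m1 ri (fr ++ PySem.List.pyRange ci (ci + ((n-1).toNat.choose (r-1).toNat : Nat)) 1) with hm2
        have hm2len : m2.length = m.length := by
          rw [hm2, PySem.List.length_pySetD, hm1len]
        obtain ⟨m', hm', hm'len⟩ := ih (n-1) (r-1) m2 (ri+1) (ci + ((n-1).toNat.choose (r-1).toNat : Nat))
          (by by_cases h : r - 1 = 1
              · exact Or.inl h
              · exact Or.inr (Or.inr ⟨by omega, by omega, by rw [hm2len]; omega, by rw [hm2len]; omega⟩))
          (by omega) (by omega)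
        refine ⟨m', ?_, by rw [hm'len, hm2len]⟩
        rw [show shA (fuel+1) n r m ri ci =
          shA fuel (n-1) (r-1) m2 (ri+1) (ci + ((n-1).toNat.choose (r-1).toNat : Nat)) from by
            simp only [shA, if_neg hr1, if_neg hnr, hfr, hm1]; rw [← hm2], hm']
        congr 2
        have ha : n.toNat = (n-1).toNat + 1 := by omega
        have hb : (r-1).toNat = (r-2).toNat + 1 := by omega
        have hb' : (r-1-1).toNat = (r-2).toNat := by omega
        rw [ha, hb, Nat.choose_succ_succ, hb']
        push_cast
        ring

theorem combos_len (M : Nat) : ∀ (lo n : Int) (k : Nat), (n - lo).toNat = M →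
    (combosPos lo n k).length = M.choose k := by
  induction M with
  | zero =>
    intro lo n k hM
    cases k with
    | zero => simp [combosPos]
    | succ k =>
      rw [combosPos, show PySem.List.pyRange lo (n - ((k : Int) + 1) + 1) 1 = [] from by
        rw [PySem.List.pyRange_one]; simp; omega]
      simp [Nat.choose_eq_zero_of_lt (by omega : 0 < k + 1)]
  | succ M ih =>
    intro lo n k hM
    cases k with
    | zero => simp [combosPos]
    | succ k =>
      rw [combosPos]
      by_cases hemp : n - ((k : Int) + 1) + 1 ≤ lo
      · rw [show PySem.List.pyRange lo (n - ((k : Int) + 1) + 1) 1 = [] from by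
          rw [PySem.List.pyRange_one]; simp; omega]
        simp [Nat.choose_eq_zero_of_lt (by omega : M + 1 < k + 1)]
      · rw [PySem.List.pyRange_one_cons (by omega)]
        rw [List.flatMap_cons, List.length_append, List.length_map]
        have htail : ((PySem.List.pyRange (lo + 1) (n - ((k : Int) + 1) + 1) 1).flatMap
            (fun first => (combosPos (first + 1) n k).map (fun rest => first :: rest))).length
            = (combosPos (lo + 1) n (k + 1)).length := by
          rw [combosPos]
        rw [htail, ih (lo+1) n k (by omega), ih (lo+1) n (k+1) (by omega), Nat.choose_succ_succ]

theorem alt_closed (num_buns num_required : Int) (matrix : List (List Int)) (row_index column_index : Int)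
    (h : 1 ≤ num_required ∧ num_required ≤ num_buns) (hne : ¬ num_required = num_buns) :
    solution_helper_alt num_buns num_required matrix row_index column_index =
      column_index + ((combosPos 0 num_buns (num_required - 1).toNat).length : Int) := by
  simp [solution_helper_alt, h, hne]

theorem alt_diag (num_buns num_required : Int) (matrix : List (List Int)) (row_index column_index : Int)
    (h : 1 ≤ num_required ∧ num_required ≤ num_buns) (heq : num_required = num_buns) :
    solution_helper_alt num_buns num_required matrix row_index column_index =
      column_index + num_buns := by
  unfold solution_helper_alt
  rw [if_pos h, if_pos heq]

-- ===== VERDICT (by name: the statement is the Claim_ definition above) =====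
theorem solution_helper_spec : Claim_equal_solution_helper := by
  intro n r m ri ci _ hpre
  obtain ⟨hr1, hrn, hcase⟩ := hpre
  have hP : r = 1 ∨ (n = r ∧ 1 ≤ n) ∨
      (2 ≤ r ∧ r < n ∧ -(m.length : Int) ≤ ri ∧ ri + n ≤ (m.length : Int) + 2) := by
    rcases hcase with h | h | h
    · exact Or.inl h
    · exact Or.inr (Or.inl ⟨h.symm, by omega⟩)
    · by_cases h1 : r = 1
      · exact Or.inl h1
      · by_cases h2 : n = r
        · exact Or.inr (Or.inl ⟨h2, by omega⟩)
        · exact Or.inr (Or.inr ⟨by omega, by omega, h.1, h.2⟩)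
  obtain ⟨ma, hA, _⟩ := shA_returns (2 * m.length + 3) n r m ri ci hP
    (by intro h; rcases hP with h' | h' | h' <;> omega) (by omega)
  show solution_helper n r m ri ci = solution_helper_alt n r m ri ci
  by_cases hd : r = n
  · rw [alt_diag n r m ri ci ⟨hr1, hrn⟩ hd]
    have hch : ((n.toNat.choose (r-1).toNat : Nat) : Int) = n := by
      rw [show (r-1).toNat = n.toNat - 1 by omega, Nat.choose_symm (by omega),
          Nat.choose_one_right]
      omega
    rw [hch] at hA
    simp only [solution_helper, hA]
  · rw [alt_closed n r m ri ci ⟨hr1, hrn⟩ hd, combos_len n.toNat 0 n (r - 1).toNat (by omega)]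
    simp only [solution_helper, hA]
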